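-- pv_equiv track=rewrite | github.com/LaryPop26/UBB-CS | FirstSemester/Programming fundamentals/Labs/lab2/functions.py | verifica_prop
-- ===== SOURCE A (Python) =====
-- def frequency(n):    # 8, 10
--     """
--     Determine the frequency of each digit in n
--     :param n: an integer value
--     :return: cifre - list of frequency
--     """
--     cifre = [0, 0, 0, 0, 0, 0, 0, 0, 0, 0]
--     while n > 0:
--         cifre[n % 10] += 1
--         n = n//10
--     return cifre
--
-- def verifica_prop(n1, n2):    # 11
--     """
--     Check if the 2 numbers contain the same digits
--     :param n1: an integer value
--     :param n2: an integer value
--     :return: true, if the condition is true, false otherwise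
--     """
--     cifre1 = frequency(n1)
--     cifre2 = frequency(n2)
--     for i in range(0, len(cifre1)):
--         for j in range(0, len(cifre2)):
--             if i == j:
--                 if cifre1[i] == 0 and not cifre2[j] == 0:
--                     return False
--                 if cifre2[j] == 0 and not cifre1[i] == 0:
--                     return False
--     return True
-- ===== SOURCE B (Python) =====
-- def _has_digit(b, d):
--     # does d occur among the decimal digits of b (extracted while b > 0)?
--     while b > 0:
--         if b % 10 == d:
--             return True
--         b //= 10
--     return False
--
-- def _covers(a, b):
--     # is every digit of a also a digit of b?
--     while a > 0:
--         if not _has_digit(b, a % 10):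
--             return False
--         a //= 10
--     return True
--
-- def verifica_prop(n1, n2):
--     return _covers(n1, n2) and _covers(n2, n1)
-- ===== Notes on version B (the rewrite author's own statement) =====
-- stated objective: alternative
-- what changed: Removes the frequency arrays entirely: instead of tallying counts into two 10-slot lists and comparing presence bits in a nested index loop, B checks mutual digit coverage directly - for each digit of n1 it scans n2's digits for membership, and vice versa - with no auxiliary container at all.
import Mathlib
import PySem

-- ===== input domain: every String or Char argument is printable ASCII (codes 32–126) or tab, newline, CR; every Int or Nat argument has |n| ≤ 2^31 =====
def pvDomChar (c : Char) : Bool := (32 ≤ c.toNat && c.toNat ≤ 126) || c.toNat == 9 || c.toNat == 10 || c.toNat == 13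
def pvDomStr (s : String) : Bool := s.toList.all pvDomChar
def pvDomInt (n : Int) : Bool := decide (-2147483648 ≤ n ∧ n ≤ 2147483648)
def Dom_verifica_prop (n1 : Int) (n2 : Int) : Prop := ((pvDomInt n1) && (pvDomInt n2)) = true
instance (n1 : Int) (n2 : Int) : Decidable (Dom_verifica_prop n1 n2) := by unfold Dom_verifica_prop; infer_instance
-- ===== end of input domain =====

-- B drops A's two 10-slot frequency arrays and the nested index-comparison loop, checking mutual digit coverage directly with no auxiliary container (objective: alternative).

-- ===== PORT A =====
-- frequency's loop: while n > 0: cifre[n % 10] += 1; n = n // 10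
def pvFreqGo (n : Int) (c : List Int) : List Int :=
  if _h : 0 < n then
    pvFreqGo (PySem.Int.floordiv n 10)
      (PySem.List.pySetD c (PySem.Int.mod n 10)
        (PySem.List.pyGetD c (PySem.Int.mod n 10) 0 + 1))
  else c
termination_by n.toNat
decreasing_by
  rw [PySem.Int.floordiv_eq_ediv_of_pos (by omega)]
  have h1 : n / 10 < n := Int.ediv_lt_of_lt_mul (by omega) (by omega)
  have h2 : 0 ≤ n / 10 := Int.ediv_nonneg (by omega) (by omega)
  omega

def frequency (n : Int) : List Int := pvFreqGo n [0, 0, 0, 0, 0, 0, 0, 0, 0, 0]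

-- inner loop: for j in range(0, len(cifre2)), with the two early 'return False' (some false = early return)
def pvInner (c1 c2 : List Int) (i : Int) : List Int → Option Bool
  | [] => none
  | j :: js =>
    if i = j then
      if PySem.List.pyGetD c1 i 0 = 0 ∧ ¬ PySem.List.pyGetD c2 j 0 = 0 then some false
      else if PySem.List.pyGetD c2 j 0 = 0 ∧ ¬ PySem.List.pyGetD c1 i 0 = 0 then some false
      else pvInner c1 c2 i js
    else pvInner c1 c2 i js

-- outer loop: for i in range(0, len(cifre1))
def pvOuter (c1 c2 : List Int) : List Int → Bool
  | [] => true
  | i :: is' =>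
    match pvInner c1 c2 i (PySem.List.pyRange 0 10 1) with
    | some b => b
    | none => pvOuter c1 c2 is'

def verifica_prop (n1 : Int) (n2 : Int) : Bool :=
  pvOuter (frequency n1) (frequency n2) (PySem.List.pyRange 0 10 1)

-- ===== PORT B =====
-- _has_digit's loop: while b > 0: if b % 10 == d: return True; b //= 10
def pvHasDigit (b d : Int) : Bool :=
  if _h : 0 < b then
    if PySem.Int.mod b 10 = d then true
    else pvHasDigit (PySem.Int.floordiv b 10) d
  else false
termination_by b.toNat
decreasing_by
  rw [PySem.Int.floordiv_eq_ediv_of_pos (by omega)]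
  have h1 : b / 10 < b := Int.ediv_lt_of_lt_mul (by omega) (by omega)
  have h2 : 0 ≤ b / 10 := Int.ediv_nonneg (by omega) (by omega)
  omega

-- _covers' loop: while a > 0: if not _has_digit(b, a % 10): return False; a //= 10
def pvCovers (a b : Int) : Bool :=
  if _h : 0 < a then
    if pvHasDigit b (PySem.Int.mod a 10) then pvCovers (PySem.Int.floordiv a 10) b
    else false
  else true
termination_by a.toNat
decreasing_by
  rw [PySem.Int.floordiv_eq_ediv_of_pos (by omega)]
  have h1 : a / 10 < a := Int.ediv_lt_of_lt_mul (by omega) (by omega)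
  have h2 : 0 ≤ a / 10 := Int.ediv_nonneg (by omega) (by omega)
  omega

def verifica_prop_alt (n1 : Int) (n2 : Int) : Bool :=
  pvCovers n1 n2 && pvCovers n2 n1

-- ===== PRECONDITION & SPEC =====
def Spec_verifica_prop (n1 : Int) (n2 : Int) (out : Bool) : Prop := out = verifica_prop_alt n1 n2
instance (n1 : Int) (n2 : Int) (out : Bool) : Decidable (Spec_verifica_prop n1 n2 out) := by unfold Spec_verifica_prop; infer_instance

-- ===== CLAIM (what is proved, stated in full; the proofs are below) =====
def Claim_equal_verifica_prop : Prop := ∀ (n1 : Int) (n2 : Int), Dom_verifica_prop n1 n2 → Spec_verifica_prop n1 n2 (verifica_prop n1 n2)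

-- ===== LEMMAS AND PROOFS =====

-- the inner loop fires its early return exactly when j = i is reached and the presence bits at i differ
theorem pvInner_eq (c1 c2 : List Int) (i : Int) (js : List Int) :
    pvInner c1 c2 i js =
      if i ∈ js ∧ ((PySem.List.pyGetD c1 i 0 = 0 ∧ PySem.List.pyGetD c2 i 0 ≠ 0) ∨
                   (PySem.List.pyGetD c2 i 0 = 0 ∧ PySem.List.pyGetD c1 i 0 ≠ 0))
      then some false else none := by
  induction js with
  | nil => simp [pvInner]
  | cons j js ih =>
    by_cases hij : i = j
    · subst hij
      simp only [pvInner, ih, List.mem_cons]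
      by_cases h1 : PySem.List.pyGetD c1 i 0 = 0 ∧ ¬ PySem.List.pyGetD c2 i 0 = 0
      · simp [h1]
      · by_cases h2 : PySem.List.pyGetD c2 i 0 = 0 ∧ ¬ PySem.List.pyGetD c1 i 0 = 0
        · simp [h2]
        · simp [h2]
          split_ifs with hP <;> simp_all
    · simp only [pvInner, if_neg hij, ih, List.mem_cons]
      simp [hij]

-- the outer loop returns True iff the presence bits agree at every index it visits
theorem pvOuter_eq_true (c1 c2 : List Int) (is' : List Int)
    (hsub : ∀ i ∈ is', i ∈ PySem.List.pyRange 0 10 1) :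
    pvOuter c1 c2 is' = true ↔
      ∀ i ∈ is', (PySem.List.pyGetD c1 i 0 = 0 ↔ PySem.List.pyGetD c2 i 0 = 0) := by
  induction is' with
  | nil => simp [pvOuter]
  | cons i is ih =>
    have hi : i ∈ PySem.List.pyRange 0 10 1 := hsub i (by simp)
    have hsub' : ∀ j ∈ is, j ∈ PySem.List.pyRange 0 10 1 := fun j hj => hsub j (by simp [hj])
    simp only [pvOuter, pvInner_eq, List.mem_cons]
    by_cases hm : (PySem.List.pyGetD c1 i 0 = 0 ∧ PySem.List.pyGetD c2 i 0 ≠ 0) ∨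
                  (PySem.List.pyGetD c2 i 0 = 0 ∧ PySem.List.pyGetD c1 i 0 ≠ 0)
    · simp [hi, hm]
      tauto
    · simp [hm, ih hsub']
      tauto

-- a digit reported present by pvHasDigit is a genuine decimal digit
theorem pvHasDigit_bounds (b d : Int) (h : pvHasDigit b d = true) : 0 ≤ d ∧ d < 10 := by
  by_cases hb : 0 < b
  · rw [pvHasDigit, dif_pos hb] at h
    by_cases hr : PySem.Int.mod b 10 = d
    · have h0 : 0 ≤ PySem.Int.mod b 10 := PySem.Int.mod_nonneg b (by omega)
      have h1 : PySem.Int.mod b 10 < 10 := PySem.Int.mod_lt b (by omega)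
      omega
    · rw [if_neg hr] at h
      exact pvHasDigit_bounds _ _ h
  · rw [pvHasDigit, dif_neg hb] at h
    exact absurd h (by simp)
termination_by b.toNat
decreasing_by
  rw [PySem.Int.floordiv_eq_ediv_of_pos (by omega)]
  have h1 : b / 10 < b := Int.ediv_lt_of_lt_mul (by omega) (by omega)
  have h2 : 0 ≤ b / 10 := Int.ediv_nonneg (by omega) (by omega)
  omega

-- joint invariant of A's frequency loop and B's digit-membership scan
theorem pvFreqGo_spec (n : Int) (c : List Int)
    (hlen : c.length = 10)
    (hpos : ∀ d : Int, 0 ≤ d → 0 ≤ PySem.List.pyGetD c d 0) :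
    (pvFreqGo n c).length = 10 ∧
    (∀ d : Int, 0 ≤ d →
      (PySem.List.pyGetD (pvFreqGo n c) d 0 ≠ 0 ↔
        (pvHasDigit n d = true ∨ PySem.List.pyGetD c d 0 ≠ 0))) := by
  by_cases h : 0 < n
  · rw [pvFreqGo, dif_pos h]
    set r : Int := PySem.Int.mod n 10 with hr
    have hr0 : 0 ≤ r := PySem.Int.mod_nonneg n (by omega)
    have hr10 : r < 10 := PySem.Int.mod_lt n (by omega)
    have hset : PySem.List.pySetD c r (PySem.List.pyGetD c r 0 + 1)
        = c.set r.toNat (PySem.List.pyGetD c r 0 + 1) := PySem.List.pySetD_of_nonneg _ _ hr0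
    have hget : ∀ d : Int, 0 ≤ d →
        PySem.List.pyGetD (c.set r.toNat (PySem.List.pyGetD c r 0 + 1)) d 0
          = if d = r then PySem.List.pyGetD c r 0 + 1 else PySem.List.pyGetD c d 0 := by
      intro d hd
      rw [PySem.List.pyGetD_of_nonneg _ _ hd, PySem.List.pyGetD_of_nonneg _ _ hd]
      rw [List.getD_eq_getElem?_getD, List.getD_eq_getElem?_getD, List.getElem?_set]
      by_cases hdr : d = r
      · subst hdr
        have hlt : r.toNat < c.length := by omega
        simp [hlt]
      · have hne : r.toNat ≠ d.toNat := by omega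
        simp [hne, hdr]
    rw [hset]
    have ih := pvFreqGo_spec (PySem.Int.floordiv n 10)
      (c.set r.toNat (PySem.List.pyGetD c r 0 + 1))
      (by simp [hlen])
      (by
        intro d hd
        rw [hget d hd]
        by_cases hdr : d = r
        · have := hpos r hr0; simp [hdr]; omega
        · simp [hdr]; exact hpos d hd)
    refine ⟨ih.1, ?_⟩
    intro d hd
    rw [ih.2 d hd, hget d hd]
    conv_rhs => rw [pvHasDigit, dif_pos h, ← hr]
    by_cases hdr : d = r
    · have := hpos r hr0
      simp [hdr]
      omega
    · have hrd : ¬ r = d := fun hc => hdr hc.symm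
      simp [hdr, hrd]
  · rw [pvFreqGo, dif_neg h]
    refine ⟨hlen, ?_⟩
    intro d hd
    rw [pvHasDigit, dif_neg h]
    simp
termination_by n.toNat
decreasing_by
  rw [PySem.Int.floordiv_eq_ediv_of_pos (by omega)]
  have h1 : n / 10 < n := Int.ediv_lt_of_lt_mul (by omega) (by omega)
  have h2 : 0 ≤ n / 10 := Int.ediv_nonneg (by omega) (by omega)
  omega

theorem zeros_getD (k : Nat) : List.getD [0,0,0,0,0,0,0,0,0,0] k (0:Int) = 0 := by
  rcases k with _|_|_|_|_|_|_|_|_|_|k <;> rfl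

-- frequency's slot d is nonzero exactly when B's membership scan finds d
theorem freq_hasDigit (n : Int) :
    (frequency n).length = 10 ∧
    (∀ d : Int, 0 ≤ d →
      (PySem.List.pyGetD (frequency n) d 0 ≠ 0 ↔ pvHasDigit n d = true)) := by
  unfold frequency
  have h := pvFreqGo_spec n [0,0,0,0,0,0,0,0,0,0] rfl
    (by intro d hd; rw [PySem.List.pyGetD_of_nonneg _ _ hd, zeros_getD])
  refine ⟨h.1, ?_⟩
  intro d hd
  rw [h.2 d hd, PySem.List.pyGetD_of_nonneg _ _ hd, zeros_getD]
  simp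

-- pvCovers is the pointwise inclusion of digit-presence predicates
theorem pvCovers_eq_true (a b : Int) :
    pvCovers a b = true ↔ ∀ d : Int, pvHasDigit a d = true → pvHasDigit b d = true := by
  by_cases h : 0 < a
  · rw [pvCovers, dif_pos h]
    have ih := pvCovers_eq_true (PySem.Int.floordiv a 10) b
    by_cases hm : pvHasDigit b (PySem.Int.mod a 10) = true
    · rw [if_pos hm, ih]
      constructor
      · intro H d hd
        rw [pvHasDigit, dif_pos h] at hd
        by_cases hr : PySem.Int.mod a 10 = d
        · rw [← hr]; exact hm
        · rw [if_neg hr] at hd; exact H d hd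
      · intro H d hd
        apply H
        rw [pvHasDigit, dif_pos h]
        by_cases hr : PySem.Int.mod a 10 = d
        · rw [if_pos hr]
        · rw [if_neg hr]; exact hd
    · rw [if_neg hm]
      simp only [Bool.false_eq_true, false_iff]
      intro H
      apply hm
      apply H
      rw [pvHasDigit, dif_pos h, if_pos rfl]
  · rw [pvCovers, dif_neg h]
    simp only [true_iff]
    intro d hd
    rw [pvHasDigit, dif_neg h] at hd
    exact absurd hd (by simp)
termination_by a.toNat
decreasing_by
  rw [PySem.Int.floordiv_eq_ediv_of_pos (by omega)]
  have h1 : a / 10 < a := Int.ediv_lt_of_lt_mul (by omega) (by omega)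
  have h2 : 0 ≤ a / 10 := Int.ediv_nonneg (by omega) (by omega)
  omega

-- ===== VERDICT (by name: the statement is the Claim_ definition above) =====
theorem verifica_prop_spec : Claim_equal_verifica_prop := by
  intro n1 n2 _
  show verifica_prop n1 n2 = verifica_prop_alt n1 n2
  obtain ⟨hl1, hr1⟩ := freq_hasDigit n1
  obtain ⟨hl2, hr2⟩ := freq_hasDigit n2
  have hout : ∀ (c : List Int), c.length = 10 → ∀ x : Int, 10 ≤ x → PySem.List.pyGetD c x 0 = 0 := by
    intro c hc x hx
    rw [PySem.List.pyGetD_of_nonneg _ _ (by omega)]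
    exact List.getD_eq_default _ _ (by omega)
  rw [verifica_prop, verifica_prop_alt, Bool.eq_iff_iff,
      pvOuter_eq_true _ _ _ (fun i hi => hi)]
  simp only [Bool.and_eq_true, pvCovers_eq_true]
  constructor
  · intro H
    have key : ∀ d : Int, pvHasDigit n1 d = true ↔ pvHasDigit n2 d = true := by
      intro d
      by_cases hd10 : 0 ≤ d ∧ d < 10
      · rw [← hr1 d hd10.1, ← hr2 d hd10.1]
        have := H d (by rw [PySem.List.mem_pyRange_one]; omega)
        tauto
      · constructor <;> intro hmem <;> exact absurd (pvHasDigit_bounds _ _ hmem) hd10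
    exact ⟨fun d hd => (key d).mp hd, fun d hd => (key d).mpr hd⟩
  · rintro ⟨H1, H2⟩ i hi
    rw [PySem.List.mem_pyRange_one] at hi
    have h1 := hr1 i (by omega)
    have h2 := hr2 i (by omega)
    have := H1 i
    have := H2 i
    tauto
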